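-- pv_equiv track=rewrite | github.com/SLakhmani/Learning-Python | Cheap Flight Finder (Intermediate+)/flight_search.py | find_cheapest
-- ===== SOURCE A (Python) =====
-- def find_cheapest(search_results):
--     cheapest = search_results[0]
--
--     for flight in search_results:
--         if cheapest["price"] > flight["price"]:
--             cheapest = flight
--         else:
--             if cheapest["price"] == flight["price"]:
--                 if cheapest["nightsInDest"] < flight["nightsInDest"]:
--                     cheapest = flight
--
--     return cheapest
-- ===== SOURCE B (Python) =====
-- def find_cheapest(search_results):
--     return sorted(search_results, key=lambda f: (f["price"], -f["nightsInDest"]))[0]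
-- ===== Notes on version B (the rewrite author's own statement) =====
-- stated objective: idiomatic
-- what changed: Replaces A's running-best scan with manual price/nights comparisons by a one-line stable sort on the tuple key (price, -nightsInDest) followed by taking element 0.
import Mathlib
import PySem

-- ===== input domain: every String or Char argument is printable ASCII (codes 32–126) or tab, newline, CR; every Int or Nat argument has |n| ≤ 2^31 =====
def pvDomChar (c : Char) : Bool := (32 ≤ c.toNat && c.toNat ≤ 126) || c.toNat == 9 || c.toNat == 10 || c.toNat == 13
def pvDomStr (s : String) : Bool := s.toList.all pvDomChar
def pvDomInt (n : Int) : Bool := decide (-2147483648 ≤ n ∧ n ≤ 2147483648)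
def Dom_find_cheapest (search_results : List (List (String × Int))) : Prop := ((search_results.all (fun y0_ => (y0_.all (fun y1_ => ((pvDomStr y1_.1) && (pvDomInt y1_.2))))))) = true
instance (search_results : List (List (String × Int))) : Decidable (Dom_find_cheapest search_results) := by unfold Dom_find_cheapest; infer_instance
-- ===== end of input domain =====

-- B is the idiomatic one-liner: stable sort by (price, -nightsInDest), take element 0.
-- Equivalence of return values; neither version mutates its argument.

-- ===== PORT A =====
def priceOf (d : List (String × Int)) : Int := PySem.Dict.getD ⟨d⟩ "price" 0
def nightsOf (d : List (String × Int)) : Int := PySem.Dict.getD ⟨d⟩ "nightsInDest" 0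

def find_cheapest (search_results : List (List (String × Int))) : List (String × Int) :=
  let cheapest := PySem.List.pyGetD search_results 0 []
  search_results.foldl (fun cheapest flight =>
    if priceOf cheapest > priceOf flight then flight
    else if priceOf cheapest = priceOf flight then
      (if nightsOf cheapest < nightsOf flight then flight else cheapest)
    else cheapest) cheapest

-- ===== PORT B =====
def find_cheapest_alt (search_results : List (List (String × Int))) : List (String × Int) :=
  PySem.List.pyGetD
    (PySem.List.sorted2 search_results priceOf (fun f => -(nightsOf f)) false) 0 []

-- ===== PRECONDITION & SPEC =====
-- Pre_ excludes the empty list (A raises IndexError) and lists containing a dict without a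
-- "price" or "nightsInDest" key: there A either raises KeyError or, reading "nightsInDest"
-- lazily (only on a price tie), happens to return, while B's tuple key always reads both
-- keys and raises KeyError.
def Pre_find_cheapest (search_results : List (List (String × Int))) : Prop :=
  search_results ≠ [] ∧
  ∀ d ∈ search_results,
    (PySem.Dict.get? ⟨d⟩ "price").isSome = true ∧
    (PySem.Dict.get? ⟨d⟩ "nightsInDest").isSome = true
instance (search_results : List (List (String × Int))) : Decidable (Pre_find_cheapest search_results) := by
  unfold Pre_find_cheapest; infer_instance

def pvWitness_find_cheapest : (List (List (String × Int))) :=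
  ([[("price", 10), ("nightsInDest", 3)], [("price", 10), ("nightsInDest", 5)]])

def Spec_find_cheapest (search_results : List (List (String × Int))) (out : List (String × Int)) : Prop := out = find_cheapest_alt search_results
instance (search_results : List (List (String × Int))) (out : List (String × Int)) : Decidable (Spec_find_cheapest search_results out) := by unfold Spec_find_cheapest; infer_instance

-- ===== CLAIM (what is proved, stated in full; the proofs are below) =====
def Claim_equal_find_cheapest : Prop := ∀ (search_results : List (List (String × Int))), Dom_find_cheapest search_results → Pre_find_cheapest search_results → Spec_find_cheapest search_results (find_cheapest search_results)

-- ===== LEMMAS AND PROOFS =====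

-- the "comes strictly before" test sorted2 uses for our tuple key
def bef (a b : List (String × Int)) : Bool :=
  decide (priceOf a < priceOf b) ||
    (!decide (priceOf b < priceOf a) && decide (-(nightsOf a) < -(nightsOf b)))

-- A's loop body is exactly "replace cheapest when the new flight sorts strictly before it"
theorem step_eq_bef (c f : List (String × Int)) :
    (if priceOf c > priceOf f then f
     else if priceOf c = priceOf f then
       (if nightsOf c < nightsOf f then f else c)
     else c) = (if bef f c then f else c) := by
  simp only [bef, gt_iff_lt, Bool.or_eq_true, decide_eq_true_eq, Bool.and_eq_true,
    Bool.not_eq_true', decide_eq_false_iff_not]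
  split_ifs <;> first | rfl | omega

-- head of the insertion-sort fold started at a nonempty accumulator is the running best
theorem foldl_insertBy_head (l : List (List (String × Int))) :
    ∀ (m : List (String × Int)) (r : List (List (String × Int))),
      ∃ r', l.foldl (fun acc x => PySem.List.insertBy bef x acc) (m :: r)
            = (l.foldl (fun c f => if bef f c then f else c) m) :: r' := by
  induction l with
  | nil => intro m r; exact ⟨r, rfl⟩
  | cons x l ih =>
    intro m r
    by_cases h : bef x m
    · simpa [List.foldl, PySem.List.insertBy, h] using ih x (m :: r)
    · simpa [List.foldl, PySem.List.insertBy, h] using ih m (PySem.List.insertBy bef x r)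

-- ===== VERDICT (by name: the statement is the Claim_ definition above) =====
theorem find_cheapest_spec : Claim_equal_find_cheapest := by
  intro xs _ hpre
  unfold Pre_find_cheapest at hpre
  unfold Spec_find_cheapest
  cases xs with
  | nil => exact absurd rfl hpre.1
  | cons x t =>
    have hA : find_cheapest (x :: t)
        = t.foldl (fun c f => if bef f c then f else c) x := by
      show (x :: t).foldl (fun c f =>
          if priceOf c > priceOf f then f
          else if priceOf c = priceOf f then
            (if nightsOf c < nightsOf f then f else c)
          else c) (PySem.List.pyGetD (x :: t) 0 []) = _
      have hfun : (fun (c f : List (String × Int)) =>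
          if priceOf c > priceOf f then f
          else if priceOf c = priceOf f then
            (if nightsOf c < nightsOf f then f else c)
          else c) = fun c f => if bef f c then f else c := by
        funext c f; exact step_eq_bef c f
      rw [hfun]
      simp [pysem, List.foldl]
    have hB : PySem.List.sorted2 (x :: t) priceOf (fun f => -(nightsOf f)) false
        = t.foldl (fun acc y => PySem.List.insertBy bef y acc) [x] := rfl
    obtain ⟨r', hr⟩ := foldl_insertBy_head t x []
    rw [hA]
    show _ = PySem.List.pyGetD (PySem.List.sorted2 (x :: t) priceOf (fun f => -(nightsOf f)) false) 0 []
    rw [hB, hr]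
    simp [pysem]
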